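-- pv_equiv track=rewrite | github.com/Florian-Riesen-CH/GenerateExos | .venv/utils.py | remove_newlines_not_inside_quotes
-- ===== SOURCE A (Python) =====
-- def remove_newlines_not_inside_quotes(json_string):
--     # Pour suivre si on est à l'intérieur de guillemets
--     in_quotes = False
--     json_result = ""
--
--     # Parcourir chaque caractère dans la chaîne
--     for char in json_string:
--         if char == "\"":
--             # Bascule l'état de 'in_quotes'
--             in_quotes = not in_quotes
--         # Si on trouve un newline et qu'on n'est pas à l'intérieur de guillemets, on continue sans l'ajouter
--         if char == "\n" and not in_quotes:
--             continue
--         if char == "\\n" and not in_quotes: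
--             continue
--
--         # Sinon, on ajoute le caractère au résultat
--         json_result += char
--
--     return json_result
-- ===== SOURCE B (Python) =====
-- def remove_newlines_not_inside_quotes(json_string):
--     # Even-indexed segments of split('"') lie outside quotes: strip newlines there.
--     parts = json_string.split('"')
--     return '"'.join(p.replace('\n', '') if i % 2 == 0 else p
--                     for i, p in enumerate(parts))
-- ===== Notes on version B (the rewrite author's own statement) =====
-- stated objective: simpler
-- what changed: Replaces the explicit in_quotes state machine with per-character string accumulation by split-on-quote, strip newlines from even-indexed segments, rejoin; A's dead comparison of a single character against a two-character string disappears.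
import Mathlib
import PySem

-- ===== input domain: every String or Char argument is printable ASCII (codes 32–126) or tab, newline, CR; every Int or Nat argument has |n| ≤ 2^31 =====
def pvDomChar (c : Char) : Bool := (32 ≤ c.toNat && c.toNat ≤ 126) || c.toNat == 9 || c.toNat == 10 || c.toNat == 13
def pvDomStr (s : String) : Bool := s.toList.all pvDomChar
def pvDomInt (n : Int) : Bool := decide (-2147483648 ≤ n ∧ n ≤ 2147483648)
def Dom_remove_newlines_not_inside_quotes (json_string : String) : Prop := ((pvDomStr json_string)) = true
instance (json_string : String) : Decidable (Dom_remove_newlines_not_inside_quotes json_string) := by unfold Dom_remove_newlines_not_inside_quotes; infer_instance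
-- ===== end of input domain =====

-- B replaces A's in_quotes state machine by split-on-quote / strip newlines in even segments / rejoin (simpler decomposition).


-- ===== PORT A =====
-- The loop over characters with the toggled in_quotes flag and the growing result string;
-- Python's `char == "\\n"` compares a 1-char string with a 2-char string (always False):
-- ported literally as the list comparison [char] = ['\\','n'].
def remove_newlines_not_inside_quotes (json_string : String) : String :=
  String.ofList (json_string.toList.foldl
    (fun (st : Bool × List Char) char =>
      let in_quotes := if char = '"' then !st.1 else st.1
      if char = '\n' ∧ in_quotes = false then (in_quotes, st.2)
      else if [char] = ['\\', 'n'] ∧ in_quotes = false then (in_quotes, st.2)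
      else (in_quotes, st.2 ++ [char]))
    (false, [])).2

-- ===== PORT B =====
-- json_string.split('"')  (split on a single quote character; exact Python semantics: "" ↦ [""])
def splitQ : List Char → List (List Char)
  | [] => [[]]
  | c :: cs =>
    if c = '"' then [] :: splitQ cs
    else
      match splitQ cs with
      | [] => [[c]]
      | s :: rest => (c :: s) :: rest

-- the comprehension: p.replace('\n','') on even-indexed segments, p unchanged on odd ones
def stripAlt (even : Bool) : List (List Char) → List (List Char)
  | [] => []
  | s :: rest => (if even then s.filter (fun c => c ≠ '\n') else s) :: stripAlt (!even) rest

def remove_newlines_not_inside_quotes_alt (json_string : String) : String :=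
  String.ofList (List.intercalate ['"'] (stripAlt true (splitQ json_string.toList)))

-- ===== PRECONDITION & SPEC =====
def Spec_remove_newlines_not_inside_quotes (json_string : String) (out : String) : Prop := out = remove_newlines_not_inside_quotes_alt json_string
instance (json_string : String) (out : String) : Decidable (Spec_remove_newlines_not_inside_quotes json_string out) := by unfold Spec_remove_newlines_not_inside_quotes; infer_instance

-- ===== CLAIM (what is proved, stated in full; the proofs are below) =====
def Claim_equal_remove_newlines_not_inside_quotes : Prop := ∀ (json_string : String), Dom_remove_newlines_not_inside_quotes json_string → Spec_remove_newlines_not_inside_quotes json_string (remove_newlines_not_inside_quotes json_string)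

-- ===== LEMMAS AND PROOFS =====

-- A's loop, without the accumulator: the characters it emits from state b.
def goA (b : Bool) : List Char → List Char
  | [] => []
  | c :: cs =>
    let b' := if c = '"' then !b else b
    if c = '\n' ∧ b' = false then goA b' cs
    else c :: goA b' cs

lemma foldA_eq (cs : List Char) : ∀ (b : Bool) (acc : List Char),
    (cs.foldl
      (fun (st : Bool × List Char) char =>
        let in_quotes := if char = '"' then !st.1 else st.1
        if char = '\n' ∧ in_quotes = false then (in_quotes, st.2)
        else if [char] = ['\\', 'n'] ∧ in_quotes = false then (in_quotes, st.2)
        else (in_quotes, st.2 ++ [char]))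
      (b, acc)).2 = acc ++ goA b cs := by
  induction cs with
  | nil => intro b acc; simp [goA]
  | cons c cs ih =>
    intro b acc
    have h2 : ¬ ([c] = ['\\', 'n'] ∧ (if c = '"' then !b else b) = false) := by simp
    by_cases h : c = '\n' ∧ (if c = '"' then !b else b) = false
    · simp only [List.foldl, goA, if_pos h, if_neg h2, ih]
    · simp only [List.foldl, goA, if_neg h, if_neg h2, ih, List.append_assoc,
        List.singleton_append]

lemma splitQ_cons_exists (cs : List Char) : ∃ s rest, splitQ cs = s :: rest := by
  cases cs with
  | nil => exact ⟨[], [], rfl⟩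
  | cons c cs =>
    by_cases h : c = '"'
    · exact ⟨[], splitQ cs, by simp [splitQ, h]⟩
    · obtain ⟨s, rest, hs⟩ : ∃ s rest, splitQ cs = s :: rest := by
        clear h
        cases cs with
        | nil => exact ⟨[], [], rfl⟩
        | cons d ds =>
          by_cases hd : d = '"'
          · exact ⟨[], splitQ ds, by simp [splitQ, hd]⟩
          · simp only [splitQ, hd]
            rcases hrec : splitQ ds with _ | ⟨s, rest⟩
            · exact ⟨[d], [], by simp⟩
            · exact ⟨d :: s, rest, by simp⟩
      exact ⟨c :: s, rest, by simp [splitQ, h, hs]⟩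

lemma intercalate_cons_cons {α : Type} (sep x y : List α) (l : List (List α)) :
    List.intercalate sep (x :: y :: l) = x ++ sep ++ List.intercalate sep (y :: l) := by
  simp [List.intercalate, List.intersperse]

lemma stripAlt_ne_nil (e : Bool) (s : List Char) (rest : List (List Char)) :
    stripAlt e (s :: rest) ≠ [] := by
  cases e <;> simp [stripAlt]

lemma intercalate_cons_ne_nil {α : Type} (sep x : List α) (l : List (List α)) (h : l ≠ []) :
    List.intercalate sep (x :: l) = x ++ sep ++ List.intercalate sep l := by
  cases l with
  | nil => exact absurd rfl h
  | cons y ys => exact intercalate_cons_cons sep x y ys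

lemma joinAlt_cons_char (e : Bool) (c : Char) (s : List Char) (rest : List (List Char)) :
    List.intercalate ['"'] (stripAlt e ((c :: s) :: rest)) =
      (if e = true ∧ c = '\n' then [] else [c]) ++ List.intercalate ['"'] (stripAlt e (s :: rest)) := by
  cases rest with
  | nil =>
    cases e <;> by_cases h : c = '\n' <;> simp [stripAlt, List.intercalate, h]
  | cons t ts =>
    cases e <;> by_cases h : c = '\n' <;>
      simp [stripAlt, intercalate_cons_cons, h]

lemma goA_eq (cs : List Char) : ∀ b : Bool,
    goA b cs = List.intercalate ['"'] (stripAlt (!b) (splitQ cs)) := by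
  induction cs with
  | nil =>
    intro b; cases b <;> simp [goA, splitQ, stripAlt, List.intercalate]
  | cons c cs ih =>
    intro b
    by_cases hq : c = '"'
    · subst hq
      obtain ⟨s, rest, hs⟩ := splitQ_cons_exists cs
      have hrw : splitQ ('"' :: cs) = [] :: s :: rest := by simp [splitQ, hs]
      rw [hrw]
      have : stripAlt (!b) ([] :: s :: rest) = [] :: stripAlt (!(!b)) (s :: rest) := by
        cases b <;> simp [stripAlt]
      rw [this, intercalate_cons_ne_nil _ _ _ (stripAlt_ne_nil _ _ _)]
      have hA : goA b ('"' :: cs) = '"' :: goA (!b) cs := by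
        simp [goA]
      rw [hA, ih (!b), hs]
      simp
    · obtain ⟨s, rest, hs⟩ := splitQ_cons_exists cs
      have hrw : splitQ (c :: cs) = (c :: s) :: rest := by simp [splitQ, hq, hs]
      rw [hrw, joinAlt_cons_char, ← hs, ← ih b]
      by_cases hn : c = '\n'
      · cases b <;> simp [goA, hq, hn]
      · cases b <;> simp [goA, hq, hn]

-- ===== VERDICT (by name: the statement is the Claim_ definition above) =====
theorem remove_newlines_not_inside_quotes_spec : Claim_equal_remove_newlines_not_inside_quotes := by
  intro s _
  unfold Spec_remove_newlines_not_inside_quotes remove_newlines_not_inside_quotes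
    remove_newlines_not_inside_quotes_alt
  rw [foldA_eq, goA_eq]
  simp
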